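-- pv_equiv track=rewrite | github.com/Kwounsu/Algorithms | 프로그래머스/선입 선출 스케줄링.py | solution
-- ===== SOURCE A (Python) =====
-- def solution(n, cores):
--     if n <= len(cores):
--         return n
--
--     n -= len(cores)
--
--     def get_time():
--         left, right = 0, n * min(cores)
--         while left < right:
--             mid = (left + right) // 2
--
--             count = 0
--             for core in cores:
--                 count += mid // core
--
--             if n > count:
--                 left = mid + 1
--             else:
--                 right = mid
--         return right
--
--     t = get_time()
--
--     for core in cores:
--         n -= (t - 1) // core
--
--     for i in range(len(cores)):
--         if t % cores[i] == 0:
--             n -= 1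
--             if n == 0:
--                 return i + 1
-- ===== SOURCE B (Python) =====
-- def solution(n, cores):
--     m = len(cores)
--     if n <= m:
--         return n
--     k = n - m
--
--     # Exact harmonic bounds: with den = prod(cores) and num = sum(den // c),
--     # sum(t // c) is squeezed between t*num/den - m and t*num/den, so the time t
--     # at which the nth job starts lies in [lo, hi] below. Only the O(m) multiples
--     # of the cores inside that window matter: list them, sort, and scan.
--     den = 1
--     for c in cores:
--         den *= c
--     num = sum(den // c for c in cores)
--     lo = -((-(k * den)) // num)          # ceil(k*den/num)
--     hi = -((-((k + m) * den)) // num)    # ceil((k+m)*den/num)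
--
--     events = []
--     for c in cores:
--         for j in range(-((-lo) // c), hi // c + 1):
--             events.append(c * j)
--     events.sort()
--
--     base = sum((lo - 1) // c for c in cores)   # jobs started strictly before the window
--     cnt = base
--     t = hi
--     for e in events:
--         cnt += 1
--         if cnt >= k:
--             t = e
--             break
--
--     r = k - sum((t - 1) // c for c in cores)   # rank of the nth job among cores freeing at t
--     winners = [i + 1 for i, c in enumerate(cores) if t % c == 0]
--     return winners[r - 1]
-- ===== Notes on version B (the rewrite author's own statement) =====
-- stated objective: alternative
-- what changed: Replaces A's binary search over time by a search-free method: exact rational harmonic bounds (den = prod(cores), num = sum(den//c)) pin the nth job's start time into a window [lo,hi] that contains only O(m) core multiples, which are listed, sorted and scanned cumulatively to find the time and the winning core.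
-- outside the precondition, e.g. on solution(8, [-1, 3]): A returns 2, B raises IndexError; on solution(3, [-1, 2]): A returns None, B raises IndexError
import Mathlib
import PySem

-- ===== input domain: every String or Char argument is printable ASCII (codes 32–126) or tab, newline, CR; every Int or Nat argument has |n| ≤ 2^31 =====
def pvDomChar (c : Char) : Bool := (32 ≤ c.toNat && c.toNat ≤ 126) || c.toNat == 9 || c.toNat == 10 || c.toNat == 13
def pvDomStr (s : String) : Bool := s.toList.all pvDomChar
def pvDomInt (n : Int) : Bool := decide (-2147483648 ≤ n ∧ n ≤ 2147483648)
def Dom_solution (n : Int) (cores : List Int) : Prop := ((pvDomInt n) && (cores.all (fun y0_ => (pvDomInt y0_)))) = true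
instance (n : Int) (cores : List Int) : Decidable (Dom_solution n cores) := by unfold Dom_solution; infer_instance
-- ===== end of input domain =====

-- B replaces A's binary search over time by a search-free method: exact rational harmonic
-- bounds (den = prod(cores), num = sum(den//c)) pin the nth job's start time into a window
-- [lo,hi] holding only O(m) core multiples, which are listed, sorted and scanned; same values,
-- no speed claim.

-- ===== PORT A =====
-- binary-search loop of A's inner get_time(): while left < right: …
def goTime (n : Int) (cores : List Int) (left right : Int) : Int :=
  if h : left < right then
    let mid := PySem.Int.floordiv (left + right) 2
    let count := cores.foldl (fun acc core => acc + PySem.Int.floordiv mid core) 0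
    if n > count then goTime n cores (mid + 1) right
    else goTime n cores left mid
  else right
termination_by (right - left).toNat
decreasing_by
  · have h1 := PySem.Int.floordiv_two_mid_bounds (le_of_lt h)
    omega
  · have h2 : PySem.Int.floordiv (left + right) 2 < right := by
      rw [PySem.Int.floordiv_eq_ediv_of_pos (by omega : (0:Int) < 2)]
      rw [Int.ediv_lt_iff_lt_mul (by omega)]
      omega
    omega

def getTime (n : Int) (cores : List Int) : Int :=
  match PySem.List.min? cores (fun x => x) with
  | none => 0  -- Python: min() of an empty list raises ValueError; excluded by Pre_solution
  | some mn => goTime n cores 0 (n * mn)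

-- A's final scan: for i in range(len(cores)): if t % cores[i] == 0: n -= 1; if n == 0: return i+1
def aScan (t : Int) (cs : List Int) (i : Int) (n : Int) : Int :=
  match cs with
  | [] => 0  -- Python: falls off the end, returns None; excluded by Pre_solution
  | c :: rest =>
    if PySem.Int.mod t c = 0 then
      if n - 1 = 0 then i + 1 else aScan t rest (i + 1) (n - 1)
    else aScan t rest (i + 1) n

def solution (n : Int) (cores : List Int) : Int :=
  if n ≤ PySem.List.len cores then n
  else
    let n1 := n - PySem.List.len cores
    let t := getTime n1 cores
    let n2 := cores.foldl (fun acc core => acc - PySem.Int.floordiv (t - 1) core) n1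
    aScan t cores 0 n2

-- ===== PORT B =====
-- B's sums 'sum(x // c for c in cores)' (three of them, at different x)
def sumDivB (cores : List Int) (x : Int) : Int :=
  cores.foldl (fun acc c => acc + PySem.Int.floordiv x c) 0

-- B's product loop: den = 1; for c in cores: den *= c
def prodB (cores : List Int) : Int := cores.foldl (fun acc c => acc * c) 1

-- B's ceiling division idiom -((-a) // b)
def ceilDivB (a b : Int) : Int := -(PySem.Int.floordiv (-a) b)

-- B's event loop: for c in cores: for j in range(-((-lo)//c), hi//c + 1): events.append(c*j)
def eventsB (cores : List Int) (lo hi : Int) : List Int :=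
  cores.foldl
    (fun acc c =>
      acc ++ (PySem.List.pyRange (ceilDivB lo c) (PySem.Int.floordiv hi c + 1) 1).map
        (fun j => c * j)) []

-- B's scan: for e in events: cnt += 1; if cnt >= k: t = e; break  (t initialised to hi)
def scanE (k : Int) (s : List Int) (cnt dflt : Int) : Int :=
  match s with
  | [] => dflt
  | e :: rest => if cnt + 1 ≥ k then e else scanE k rest (cnt + 1) dflt

def solution_alt (n : Int) (cores : List Int) : Int :=
  if n ≤ PySem.List.len cores then n
  else
    let m := PySem.List.len cores
    let k := n - m
    let den := prodB cores
    let num := sumDivB cores den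
    let lo := ceilDivB (k * den) num
    let hi := ceilDivB ((k + m) * den) num
    let evs := PySem.List.sorted (eventsB cores lo hi) (fun x => x) false
    let base := sumDivB cores (lo - 1)
    let t := scanE k evs base hi
    let r := k - sumDivB cores (t - 1)
    let winners := ((PySem.List.enumerate cores 0).filter
        (fun p => PySem.Int.mod t p.2 == 0)).map (fun p => p.1 + 1)
    (PySem.List.pyGet? winners (r - 1)).getD 0  -- winners[r-1]; in range whenever Pre_ holds

-- ===== PRECONDITION & SPEC =====
-- Pre_ restricts to the task's natural domain whenever scheduling is actually needed (n > len(cores)):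
-- at least one core, every core time positive. Outside it A raises (ZeroDivisionError / ValueError),
-- returns None (no int), or — rarely — an accidental int that is meaningless for scheduling.
def Pre_solution (n : Int) (cores : List Int) : Prop :=
  n ≤ (cores.length : Int) ∨ (cores ≠ [] ∧ ∀ c ∈ cores, 0 < c)
instance (n : Int) (cores : List Int) : Decidable (Pre_solution n cores) := by
  unfold Pre_solution; infer_instance

def pvWitness_solution : Int × List Int := (5, [1, 2])

def Spec_solution (n : Int) (cores : List Int) (out : Int) : Prop := out = solution_alt n cores
instance (n : Int) (cores : List Int) (out : Int) : Decidable (Spec_solution n cores out) := by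
  unfold Spec_solution; infer_instance

-- ===== CLAIM (what is proved, stated in full; the proofs are below) =====
def Claim_equal_solution : Prop := ∀ (n : Int) (cores : List Int), Dom_solution n cores → Pre_solution n cores → Spec_solution n cores (solution n cores)

-- ===== LEMMAS AND PROOFS =====

-- S0 cs t = sum(t // c for c in cs), with Euclidean `/` (= Python's floor division for positive c)
def S0 (cs : List Int) (t : Int) : Int := (cs.map (fun c => t / c)).sum

-- selection condition at time t for a core paired with itself
def condB (t : Int) (p : Int × Int) : Bool := decide (p.1 ∣ t ∧ p.2 ≤ t)

-- pick the j-th (1-based) true position, scanning left to right, returning its 1-based index (+ offset i)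
def pickB (bs : List Bool) (i : Int) (j : Int) : Int :=
  match bs with
  | [] => 0
  | b :: rest =>
    if b then (if j - 1 = 0 then i + 1 else pickB rest (i + 1) (j - 1))
    else pickB rest (i + 1) j

lemma foldl_sub_eq (g : Int → Int) (l : List Int) :
    ∀ (a : Int), l.foldl (fun acc x => acc - g x) a = a - (l.map g).sum := by
  induction l with
  | nil => intro a; simp
  | cons x l ih => intro a; simp only [List.foldl_cons, List.map_cons, List.sum_cons, ih]; ring

lemma foldl_addg_eq (g : Int → Int) (l : List Int) :
    ∀ (a : Int), l.foldl (fun acc x => acc + g x) a = a + (l.map g).sum := by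
  induction l with
  | nil => intro a; simp
  | cons x l ih => intro a; simp only [List.foldl_cons, List.map_cons, List.sum_cons, ih]; ring

lemma S0_mono (cs : List Int) (hpos : ∀ c ∈ cs, 0 < c) {u v : Int} (huv : u ≤ v) :
    S0 cs u ≤ S0 cs v := by
  unfold S0
  exact List.sum_le_sum (fun c hc => Int.ediv_le_ediv (hpos c hc) huv)

lemma S0_nonpos (cs : List Int) (hpos : ∀ c ∈ cs, 0 < c) {u : Int} (hu : u ≤ 0) :
    S0 cs u ≤ 0 := by
  unfold S0
  have h : ((cs.map (fun c => u / c)).sum) ≤ ((cs.map (fun _ => (0:Int))).sum) :=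
    List.sum_le_sum (fun c hc => by
      have hc0 := hpos c hc
      have h1 : u / c < 1 := by
        rw [Int.ediv_lt_iff_lt_mul hc0]; omega
      omega)
  simpa using h

lemma sumDivB_eq (cs : List Int) (hpos : ∀ c ∈ cs, 0 < c) (u : Int) :
    sumDivB cs u = S0 cs u := by
  unfold sumDivB
  rw [foldl_addg_eq, zero_add]
  unfold S0
  congr 1
  apply List.map_congr_left
  intro c hc
  rw [PySem.Int.floordiv_eq_ediv_of_pos (hpos c hc)]

-- a bracketing S0(t-1) < k ≤ S0(t) pins t
lemma pin_S0 (cs : List Int) (hpos : ∀ c ∈ cs, 0 < c) (k t t' : Int)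
    (h1 : S0 cs (t - 1) < k) (h2 : k ≤ S0 cs t)
    (h3 : S0 cs (t' - 1) < k) (h4 : k ≤ S0 cs t') : t = t' := by
  rcases lt_trichotomy t t' with h | h | h
  · have := S0_mono cs hpos (show t ≤ t' - 1 by omega)
    omega
  · exact h
  · have := S0_mono cs hpos (show t' ≤ t - 1 by omega)
    omega

-- the Python test `t % c == 0` is the pair condition once t ≥ 1 and c > 0
lemma mod_cond_iff (t c : Int) (ht : 1 ≤ t) (_hc : 0 < c) :
    (PySem.Int.mod t c = 0) ↔ (condB t (c, c) = true) := by
  rw [PySem.Int.mod_eq_zero_iff_dvd]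
  unfold condB
  simp only [decide_eq_true_eq]
  constructor
  · intro hdvd; exact ⟨hdvd, Int.le_of_dvd (by omega) hdvd⟩
  · exact fun h => h.1

-- A's final scan is pickB over the condition list
lemma aScan_eq_pickB (t : Int) (ht : 1 ≤ t) :
    ∀ (cs : List Int) (i j : Int), (∀ c ∈ cs, 0 < c) →
      aScan t cs i j = pickB ((cs.zip cs).map (condB t)) i j := by
  intro cs
  induction cs with
  | nil => intro i j _; simp [aScan, pickB]
  | cons c rest ih =>
    intro i j hpos
    have hc : 0 < c := hpos c (by simp)
    have hcond := mod_cond_iff t c ht hc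
    simp only [aScan, List.zip_cons_cons, List.map_cons, pickB]
    by_cases hm : PySem.Int.mod t c = 0
    · rw [if_pos hm, if_pos (hcond.mp hm)]
      by_cases hj : j - 1 = 0
      · simp [hj]
      · rw [if_neg hj, if_neg hj, ih (i+1) (j-1) (fun c hc => hpos c (by simp [hc]))]
    · rw [if_neg hm, if_neg (by intro hcon; exact hm (hcond.mpr hcon))]
      exact ih (i+1) j (fun c hc => hpos c (by simp [hc]))

lemma pyGet?_cons_pos {α : Type} (x : α) (xs : List α) (i : Int) (hi : 1 ≤ i) :
    PySem.List.pyGet? (x :: xs) i = PySem.List.pyGet? xs (i - 1) := by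
  rw [PySem.List.pyGet?_of_nonneg _ (show (0:Int) ≤ i by omega),
    PySem.List.pyGet?_of_nonneg _ (show (0:Int) ≤ i - 1 by omega)]
  have h : i.toNat = (i - 1).toNat + 1 := by omega
  rw [h]
  simp

-- B's comprehension + indexing is pickB over the same condition list
lemma sel_eq_pickB (t : Int) (ht : 1 ≤ t) :
    ∀ (cs : List Int) (s j : Int), 1 ≤ j → (∀ c ∈ cs, 0 < c) →
      (PySem.List.pyGet? (((PySem.List.enumerate cs s).filter
          (fun p => PySem.Int.mod t p.2 == 0)).map (fun p => p.1 + 1)) (j - 1)).getD 0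
        = pickB ((cs.zip cs).map (condB t)) s j := by
  intro cs
  induction cs with
  | nil =>
    intro s j _ _
    simp [PySem.List.enumerate, PySem.List.pyGet?, pickB]
  | cons c rest ih =>
    intro s j hj hpos
    have hc : 0 < c := hpos c (by simp)
    have hcond := mod_cond_iff t c ht hc
    have henum : PySem.List.enumerate (c :: rest) s = (s, c) :: PySem.List.enumerate rest (s + 1) := by
      simp [PySem.List.enumerate]
    rw [henum]
    simp only [List.filter_cons, List.zip_cons_cons, List.map_cons, pickB]
    by_cases hm : PySem.Int.mod t c = 0
    · rw [if_pos (by simpa using hm), if_pos (hcond.mp hm)]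
      simp only [List.map_cons]
      by_cases hj1 : j - 1 = 0
      · have hj0 : j = 1 := by omega
        subst hj0
        simp
      · rw [if_neg hj1, pyGet?_cons_pos _ _ (j - 1) (by omega)]
        exact ih (s + 1) (j - 1) (by omega) (fun c hc => hpos c (by simp [hc]))
    · rw [if_neg (by simpa using hm), if_neg (by intro hcon; exact hm (hcond.mpr hcon))]
      exact ih (s + 1) j hj (fun c hc => hpos c (by simp [hc]))

-- binary search correctness: goTime returns a t with S0 cs (t-1) < k ≤ S0 cs t
lemma goTime_correct (k : Int) (cs : List Int) (hpos : ∀ c ∈ cs, 0 < c) :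
    ∀ (l r : Int), l ≤ r → S0 cs (l - 1) < k → k ≤ S0 cs r →
      S0 cs (goTime k cs l r - 1) < k ∧ k ≤ S0 cs (goTime k cs l r) := by
  suffices H : ∀ (N : Nat) (l r : Int), (r - l).toNat ≤ N → l ≤ r → S0 cs (l - 1) < k →
      k ≤ S0 cs r → S0 cs (goTime k cs l r - 1) < k ∧ k ≤ S0 cs (goTime k cs l r) by
    intro l r
    exact H (r - l).toNat l r le_rfl
  intro N
  induction N with
  | zero =>
    intro l r hN hlr h1 h2
    have hnl : ¬ l < r := by omega
    rw [goTime, dif_neg hnl]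
    have : r = l := by omega
    subst this
    exact ⟨h1, h2⟩
  | succ N ihN =>
    intro l r hN hlr h1 h2
    rw [goTime]
    by_cases hlt : l < r
    · rw [dif_pos hlt]
      simp only []
      have hmb := PySem.Int.floordiv_two_mid_bounds (le_of_lt hlt)
      have hmlt : PySem.Int.floordiv (l + r) 2 < r := by
        rw [PySem.Int.floordiv_eq_ediv_of_pos (by omega : (0:Int) < 2),
          Int.ediv_lt_iff_lt_mul (by omega)]
        omega
      have hcnt : cs.foldl
          (fun acc core => acc + PySem.Int.floordiv (PySem.Int.floordiv (l + r) 2) core) 0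
          = S0 cs (PySem.Int.floordiv (l + r) 2) := by
        rw [foldl_addg_eq]
        unfold S0
        rw [zero_add]
        congr 1
        apply List.map_congr_left
        intro c hc
        rw [PySem.Int.floordiv_eq_ediv_of_pos (hpos c hc)]
      rw [hcnt]
      by_cases hgt : k > S0 cs (PySem.Int.floordiv (l + r) 2)
      · rw [if_pos hgt]
        apply ihN _ _ (by omega) (by omega) _ h2
        have : PySem.Int.floordiv (l + r) 2 + 1 - 1 = PySem.Int.floordiv (l + r) 2 := by ring
        rw [this]
        omega
      · rw [if_neg hgt]
        exact ihN _ _ (by omega) (by omega) h1 (by omega)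
    · rw [dif_neg hlt]
      have : r = l := by omega
      subst this
      exact ⟨h1, h2⟩

-- ── B-side lemmas ──

-- the product of a positive list is positive and every element divides it
lemma prodB_eq (cs : List Int) : prodB cs = cs.prod := by
  unfold prodB
  have h : ∀ (a : Int), cs.foldl (fun acc c => acc * c) a = a * cs.prod := by
    induction cs with
    | nil => intro a; simp
    | cons c rest ih =>
      intro a
      simp only [List.foldl_cons, List.prod_cons, ih]
      ring
  rw [h, one_mul]

lemma prodB_pos (cs : List Int) (hpos : ∀ c ∈ cs, 0 < c) : 0 < prodB cs := by
  rw [prodB_eq]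
  exact List.prod_pos hpos

lemma dvd_prodB (cs : List Int) {c : Int} (hc : c ∈ cs) : c ∣ prodB cs := by
  rw [prodB_eq]
  exact List.dvd_prod hc

-- ceiling division via -((-a)//b): characterisation and uniqueness (b > 0)
lemma ceilDivB_spec (a b : Int) (hb : 0 < b) :
    a ≤ b * ceilDivB a b ∧ b * (ceilDivB a b - 1) < a := by
  unfold ceilDivB
  rw [PySem.Int.floordiv_eq_ediv_of_pos hb]
  have hdm := Int.ediv_add_emod (-a) b
  have h0 := Int.emod_nonneg (-a) (by omega : b ≠ 0)
  have h1 := Int.emod_lt_of_pos (-a) hb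
  constructor
  · nlinarith [hdm, h0]
  · nlinarith [hdm, h1]

lemma ceilDivB_unique (a b y : Int) (hb : 0 < b) (h1 : a ≤ b * y) (h2 : b * (y - 1) < a) :
    ceilDivB a b = y := by
  obtain ⟨hs1, hs2⟩ := ceilDivB_spec a b hb
  rcases lt_trichotomy (ceilDivB a b) y with h | h | h
  · have : b * (ceilDivB a b) ≤ b * (y - 1) := by
      apply mul_le_mul_of_nonneg_left (by omega) (by omega)
    omega
  · exact h
  · have : b * y ≤ b * (ceilDivB a b - 1) := by
      apply mul_le_mul_of_nonneg_left (by omega) (by omega)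
    omega

-- ceil(lo/c) = (lo-1)/c + 1 for c > 0
lemma ceilDivB_eq_floor_pred (lo c : Int) (hc : 0 < c) :
    ceilDivB lo c = (lo - 1) / c + 1 := by
  apply ceilDivB_unique _ _ _ hc
  · have hdm := Int.ediv_add_emod (lo - 1) c
    have h1 := Int.emod_lt_of_pos (lo - 1) hc
    rw [mul_add, mul_one]
    linarith
  · have hdm := Int.ediv_add_emod (lo - 1) c
    have h0 := Int.emod_nonneg (lo - 1) (by omega : c ≠ 0)
    rw [show (lo - 1) / c + 1 - 1 = (lo - 1) / c from by ring]
    linarith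

-- the two harmonic inequalities: den*S0(t) ≤ t*num and den*S0(t) ≥ t*num - m*den + m
lemma S0_harmonic_upper (den : Int) (hden : 0 < den) :
    ∀ (cs : List Int) (t : Int), (∀ c ∈ cs, 0 < c ∧ c ∣ den) →
      den * S0 cs t ≤ t * S0 cs den := by
  intro cs
  induction cs with
  | nil => intro t _; simp [S0]
  | cons c rest ih =>
    intro t h
    obtain ⟨hc, hdvd⟩ := h c (by simp)
    obtain ⟨q, hq⟩ := hdvd
    have hqden : den / c = q := by rw [hq]; exact Int.mul_ediv_cancel_left q (by omega)
    have hqpos : 0 < q := by nlinarith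
    have hterm : den * (t / c) ≤ t * (den / c) := by
      rw [hqden, hq]
      have h1 : c * (t / c) ≤ t := by
        have := Int.ediv_add_emod t c
        have := Int.emod_nonneg t (by omega : c ≠ 0)
        omega
      nlinarith
    have hrest := ih t (fun c hc => h c (by simp [hc]))
    simp only [S0, List.map_cons, List.sum_cons] at *
    nlinarith [hterm, hrest]

lemma S0_harmonic_lower (den : Int) (hden : 0 < den) :
    ∀ (cs : List Int) (t : Int), (∀ c ∈ cs, 0 < c ∧ c ∣ den) →
      t * S0 cs den - (cs.length : Int) * den + (cs.length : Int) ≤ den * S0 cs t := by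
  intro cs
  induction cs with
  | nil => intro t _; simp [S0]
  | cons c rest ih =>
    intro t h
    obtain ⟨hc, hdvd⟩ := h c (by simp)
    obtain ⟨q, hq⟩ := hdvd
    have hqden : den / c = q := by rw [hq]; exact Int.mul_ediv_cancel_left q (by omega)
    have hqpos : 0 < q := by nlinarith
    have hterm : t * (den / c) - den + 1 ≤ den * (t / c) := by
      rw [hqden, hq]
      have h1 : t - c + 1 ≤ c * (t / c) := by
        have := Int.ediv_add_emod t c
        have := Int.emod_lt_of_pos t hc
        omega
      nlinarith
    have hrest := ih t (fun c hc => h c (by simp [hc]))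
    simp only [S0, List.map_cons, List.sum_cons, List.length_cons] at *
    push_cast at *
    nlinarith [hterm, hrest]

-- num = S0 cs den is at least 1 on a nonempty positive list
lemma num_pos (cs : List Int) (hne : cs ≠ []) (hposd : ∀ c ∈ cs, 0 < c ∧ c ∣ prodB cs) :
    0 < S0 cs (prodB cs) := by
  obtain ⟨c, rest, rfl⟩ := List.exists_cons_of_ne_nil hne
  obtain ⟨hc, hdvd⟩ := hposd c (by simp)
  have hden : 0 < prodB (c :: rest) := by
    apply prodB_pos
    intro x hx
    exact (hposd x hx).1
  obtain ⟨q, hq⟩ := hdvd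
  have hq1 : prodB (c :: rest) / c = q := by
    rw [hq]; exact Int.mul_ediv_cancel_left q (by omega)
  have hqpos : 0 < q := by nlinarith
  have hrest : 0 ≤ (rest.map (fun x => prodB (c :: rest) / x)).sum := by
    apply List.sum_nonneg
    intro x hx
    obtain ⟨y, hy, rfl⟩ := List.mem_map.mp hx
    exact Int.ediv_nonneg (by omega) (le_of_lt (hposd y (by simp [hy])).1)
  simp only [S0, List.map_cons, List.sum_cons]
  rw [hq1]
  omega

-- countP of (· ≤ v) over range(a, b)
lemma countP_pyRange_le (v : Int) :
    ∀ (N : Nat) (a b : Int), (b - a).toNat ≤ N →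
      (PySem.List.pyRange a b 1).countP (fun j => decide (j ≤ v)) = (min b (v + 1) - a) ⊔ 0 := by
  intro N
  induction N with
  | zero =>
    intro a b hN
    rw [PySem.List.pyRange_one_eq_nil (by omega)]
    simp
    omega
  | succ N ih =>
    intro a b hN
    by_cases hab : a < b
    · rw [PySem.List.pyRange_one_cons hab, List.countP_cons]
      push_cast
      rw [ih (a + 1) b (by omega)]
      by_cases hv : a ≤ v
      · simp only [hv, decide_true, if_true]
        omega
      · have hvv : decide (a ≤ v) = false := by simp [hv]
        rw [hvv]
        simp only [Bool.false_eq_true, if_false]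
        omega
    · rw [PySem.List.pyRange_one_eq_nil (by omega)]
      simp
      omega

-- per-core event count below x
lemma countP_core (c : Int) (hc : 0 < c) (lo hi x : Int) (hx1 : lo - 1 ≤ x) (hx2 : x ≤ hi) :
    ((PySem.List.pyRange (ceilDivB lo c) (PySem.Int.floordiv hi c + 1) 1).map
      (fun j => c * j)).countP (fun e => decide (e ≤ x)) = x / c - (lo - 1) / c := by
  rw [List.countP_map]
  have hpred : ((fun e => decide (e ≤ x)) ∘ (fun j => c * j)) = (fun j => decide (j ≤ x / c)) := by
    funext j
    simp only [Function.comp]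
    congr 1
    rw [eq_iff_iff]
    constructor
    · intro h
      refine Int.le_ediv_iff_mul_le hc |>.mpr ?_
      rw [mul_comm]
      exact h
    · intro h
      have h2 := Int.le_ediv_iff_mul_le hc |>.mp h
      rw [mul_comm] at h2
      exact h2
  rw [hpred, countP_pyRange_le (x / c) (PySem.Int.floordiv hi c + 1 - ceilDivB lo c).toNat _ _ le_rfl,
    ceilDivB_eq_floor_pred lo c hc, PySem.Int.floordiv_eq_ediv_of_pos hc]
  have hmono1 : x / c ≤ hi / c := Int.ediv_le_ediv hc hx2
  have hmono2 : (lo - 1) / c ≤ x / c := Int.ediv_le_ediv hc hx1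
  omega

-- countP distributes over the event-building foldl
lemma countP_eventsB (cs : List Int) (lo hi : Int) (p : Int → Bool) :
    ∀ (acc : List Int),
      (cs.foldl (fun acc c =>
        acc ++ (PySem.List.pyRange (ceilDivB lo c) (PySem.Int.floordiv hi c + 1) 1).map
          (fun j => c * j)) acc).countP p
      = acc.countP p + (cs.map (fun c =>
          ((PySem.List.pyRange (ceilDivB lo c) (PySem.Int.floordiv hi c + 1) 1).map
            (fun j => c * j)).countP p)).sum := by
  induction cs with
  | nil => intro acc; simp
  | cons c rest ih =>
    intro acc
    simp only [List.foldl_cons, List.map_cons, List.sum_cons, ih, List.countP_append]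
    omega

-- the window count identity: for lo-1 ≤ x ≤ hi, #events ≤ x = S0 x - S0 (lo-1)
lemma events_count (cs : List Int) (hpos : ∀ c ∈ cs, 0 < c) (lo hi x : Int)
    (hx1 : lo - 1 ≤ x) (hx2 : x ≤ hi) :
    ((eventsB cs lo hi).countP (fun e => decide (e ≤ x)) : Int) = S0 cs x - S0 cs (lo - 1) := by
  unfold eventsB
  rw [countP_eventsB]
  simp only [List.countP_nil, zero_add]
  have h : ∀ c ∈ cs,
      (((PySem.List.pyRange (ceilDivB lo c) (PySem.Int.floordiv hi c + 1) 1).map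
        (fun j => c * j)).countP (fun e => decide (e ≤ x)) : Int) = x / c - (lo - 1) / c := by
    intro c hc
    exact countP_core c (hpos c hc) lo hi x hx1 hx2
  induction cs with
  | nil => simp [S0]
  | cons c rest ih =>
    simp only [List.map_cons, List.sum_cons, Nat.cast_add]
    rw [h c (by simp)]
    have := ih (fun c hc => hpos c (by simp [hc])) (fun c hc => h c (by simp [hc]))
    simp only [S0, List.map_cons, List.sum_cons]
    simp only [S0] at this
    omega

-- every event lies in [lo, hi]
lemma events_mem (cs : List Int) (hpos : ∀ c ∈ cs, 0 < c) (lo hi : Int) :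
    ∀ e ∈ eventsB cs lo hi, lo ≤ e ∧ e ≤ hi := by
  unfold eventsB
  suffices H : ∀ (acc : List Int), (∀ e ∈ acc, lo ≤ e ∧ e ≤ hi) →
      ∀ e ∈ cs.foldl (fun acc c =>
        acc ++ (PySem.List.pyRange (ceilDivB lo c) (PySem.Int.floordiv hi c + 1) 1).map
          (fun j => c * j)) acc, lo ≤ e ∧ e ≤ hi by
    exact H [] (by simp)
  induction cs with
  | nil => intro acc hacc; simpa using hacc
  | cons c rest ih =>
    intro acc hacc
    apply ih (fun c hc => hpos c (by simp [hc]))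
    intro e he
    rcases List.mem_append.mp he with h | h
    · exact hacc e h
    · obtain ⟨j, hj, rfl⟩ := List.mem_map.mp h
      obtain ⟨hj1, hj2⟩ := PySem.List.mem_pyRange_one.mp hj
      have hc : 0 < c := hpos c (by simp)
      rw [ceilDivB_eq_floor_pred lo c hc] at hj1
      rw [PySem.Int.floordiv_eq_ediv_of_pos hc] at hj2
      constructor
      · have hdm := Int.ediv_add_emod (lo - 1) c
        have h1 := Int.emod_lt_of_pos (lo - 1) hc
        nlinarith
      · have hj3 : j ≤ hi / c := by omega
        have hdm := Int.ediv_add_emod hi c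
        have h0 := Int.emod_nonneg hi (by omega : c ≠ 0)
        nlinarith

-- the scan over the sorted event list lands on the bracketed time
lemma scanE_bracket (k lo hi : Int) (cs : List Int) (hpos : ∀ c ∈ cs, 0 < c)
    (evs : List Int) (hperm : evs.Perm (eventsB cs lo hi)) (hsort : evs.Pairwise (· ≤ ·))
    (hhi : k ≤ S0 cs hi) (hwin : lo - 1 ≤ hi) :
    ∀ (s p : List Int), evs = p ++ s → S0 cs (lo - 1) + (p.length : Int) < k →
      S0 cs (scanE k s (S0 cs (lo - 1) + (p.length : Int)) hi - 1) < k ∧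
        k ≤ S0 cs (scanE k s (S0 cs (lo - 1) + (p.length : Int)) hi) := by
  have hmemw : ∀ e ∈ evs, lo ≤ e ∧ e ≤ hi := by
    intro e he
    exact events_mem cs hpos lo hi e (hperm.mem_iff.mp he)
  have hcount : ∀ x, lo - 1 ≤ x → x ≤ hi →
      (evs.countP (fun e => decide (e ≤ x)) : Int) = S0 cs x - S0 cs (lo - 1) := by
    intro x h1 h2
    rw [hperm.countP_eq]
    exact events_count cs hpos lo hi x h1 h2
  intro s
  induction s with
  | nil =>
    intro p hps hcnt
    exfalso
    have hlen : evs.countP (fun e => decide (e ≤ hi)) = evs.length := by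
      rw [List.countP_eq_length]
      intro e he
      simp [(hmemw e he).2]
    have hch := hcount hi hwin le_rfl
    rw [hlen] at hch
    have hplen : evs.length = p.length := by rw [hps]; simp
    omega
  | cons e rest ih =>
    intro p hps hcnt
    have hmem_e : lo ≤ e ∧ e ≤ hi := hmemw e (by rw [hps]; simp)
    have hsort' : (p ++ e :: rest).Pairwise (· ≤ ·) := hps ▸ hsort
    have hsplit := List.pairwise_append.mp hsort'
    have hrest_ge : ∀ x ∈ rest, e ≤ x := (List.pairwise_cons.mp hsplit.2.1).1
    have hp_le : ∀ a ∈ p, a ≤ e := fun a ha => hsplit.2.2 a ha e (by simp)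
    simp only [scanE]
    by_cases hk : S0 cs (lo - 1) + (p.length : Int) + 1 ≥ k
    · rw [if_pos hk]
      constructor
      · -- S0 (e-1) < k: every event ≤ e-1 lies in p
        have hc := hcount (e - 1) (by omega) (by omega)
        have hcp : evs.countP (fun x => decide (x ≤ e - 1)) ≤ p.length := by
          rw [hps, List.countP_append]
          have hrest0 : (e :: rest).countP (fun x => decide (x ≤ e - 1)) = 0 := by
            rw [List.countP_eq_zero]
            intro x hx
            rcases List.mem_cons.mp hx with rfl | hx'
            · simp only [decide_eq_true_eq]; omega
            · have hex := hrest_ge x hx'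
              simp only [decide_eq_true_eq]; omega
          rw [hrest0]
          have := List.countP_le_length (p := fun x => decide (x ≤ e - 1)) (l := p)
          omega
        omega
      · -- k ≤ S0 e: p and e itself are events ≤ e
        have hc := hcount e (by omega) hmem_e.2
        have hcp : p.length + 1 ≤ evs.countP (fun x => decide (x ≤ e)) := by
          rw [hps, List.countP_append, List.countP_cons]
          have hpfull : p.countP (fun x => decide (x ≤ e)) = p.length := by
            rw [List.countP_eq_length]
            intro x hx
            simp only [decide_eq_true_eq]
            exact hp_le x hx
          rw [hpfull]
          simp
        omega
    · rw [if_neg hk]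
      have hps' : evs = (p ++ [e]) ++ rest := by rw [hps]; simp
      have hcnt' : S0 cs (lo - 1) + ((p ++ [e]).length : Int) < k := by
        simp only [List.length_append, List.length_cons, List.length_nil]
        push_cast
        omega
      have hstep := ih (p ++ [e]) hps' hcnt'
      have hlen' : S0 cs (lo - 1) + ((p ++ [e]).length : Int)
          = S0 cs (lo - 1) + (p.length : Int) + 1 := by
        simp only [List.length_append, List.length_cons, List.length_nil]
        push_cast
        ring
      rw [hlen'] at hstep
      exact hstep

-- assembling the equivalence
lemma main_eq (n : Int) (cs : List Int) (hpre : Pre_solution n cs) :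
    solution n cs = solution_alt n cs := by
  by_cases hle : n ≤ PySem.List.len cs
  · unfold solution solution_alt
    rw [if_pos hle, if_pos hle]
  · have hlen : ¬ n ≤ (cs.length : Int) := by
      simpa [PySem.List.len_eq] using hle
    obtain ⟨hne, hpos⟩ : cs ≠ [] ∧ ∀ c ∈ cs, 0 < c := by
      rcases hpre with h | h
      · exact absurd h hlen
      · exact h
    have hm1 : 1 ≤ (cs.length : Int) := by
      have := List.length_pos_iff.mpr hne
      omega
    set k := n - (cs.length : Int) with hkdef
    have hn1 : 1 ≤ k := by omega
    -- A's time from the binary search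
    obtain ⟨mn, hmin⟩ : ∃ mn, PySem.List.min? cs (fun x => x) = some mn := by
      obtain ⟨f, rest, heq⟩ := List.exists_cons_of_ne_nil hne
      rw [heq]
      exact ⟨_, PySem.List.min?_id_cons ..⟩
    have hmnmem : mn ∈ cs := PySem.List.min?_mem hmin
    have hmnpos : 0 < mn := hpos mn hmnmem
    have hprod : 0 ≤ k * mn := mul_nonneg (by omega) (by omega)
    have hhiA : k ≤ S0 cs (k * mn) := by
      have hterm : (k * mn) / mn = k := Int.mul_ediv_cancel _ (by omega)
      have hmem2 : (k * mn) / mn ∈ cs.map (fun c => (k * mn) / c) :=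
        List.mem_map.mpr ⟨mn, hmnmem, rfl⟩
      have hle2 := List.single_le_sum
        (fun x hx => by
          obtain ⟨c, hc, rfl⟩ := List.mem_map.mp hx
          exact Int.ediv_nonneg hprod (le_of_lt (hpos c hc))) _ hmem2
      rw [hterm] at hle2
      exact hle2
    have hlo0 : S0 cs (0 - 1) < k := by
      have := S0_nonpos cs hpos (show (0:Int) - 1 ≤ 0 by omega)
      omega
    have hg := goTime_correct k cs hpos 0 (k * mn) hprod hlo0 hhiA
    set t := goTime k cs 0 (k * mn) with htdef
    have ht1 : 1 ≤ t := by
      by_contra hcon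
      have := S0_nonpos cs hpos (show t ≤ 0 by omega)
      omega
    -- B's window and scan land on the same bracket
    have hposd : ∀ c ∈ cs, 0 < c ∧ c ∣ prodB cs :=
      fun c hc => ⟨hpos c hc, dvd_prodB cs hc⟩
    have hden : 0 < prodB cs := prodB_pos cs hpos
    set den := prodB cs with hdendef
    set num := S0 cs den with hnumdef
    have hnum : 0 < num := num_pos cs hne hposd
    set lo := ceilDivB (k * den) num with hlodef
    set hi := ceilDivB ((k + (cs.length : Int)) * den) num with hhidef
    obtain ⟨hlo1, hlo2⟩ := ceilDivB_spec (k * den) num hnum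
    obtain ⟨hhi1, hhi2⟩ := ceilDivB_spec ((k + (cs.length : Int)) * den) num hnum
    have hbrlo : S0 cs (lo - 1) < k := by
      have hup := S0_harmonic_upper den hden cs (lo - 1) hposd
      rw [← hnumdef] at hup
      nlinarith
    have hbrhi : k ≤ S0 cs hi := by
      have hlw := S0_harmonic_lower den hden cs hi hposd
      rw [← hnumdef] at hlw
      nlinarith
    have hwin : lo - 1 ≤ hi := by
      by_contra hcon
      have := S0_mono cs hpos (show hi ≤ lo - 1 by omega)
      omega
    -- the scan result tB
    set evs := PySem.List.sorted (eventsB cs lo hi) (fun x => x) false with hevs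
    have hperm : evs.Perm (eventsB cs lo hi) := PySem.List.sorted_perm ..
    have hsort : evs.Pairwise (· ≤ ·) := by
      have := PySem.List.sorted_pairwise (xs := eventsB cs lo hi) (key := fun x => x)
      simpa using this
    have hscan := scanE_bracket k lo hi cs hpos evs hperm hsort hbrhi hwin evs [] (by simp)
      (by simpa using hbrlo)
    simp only [List.length_nil, Nat.cast_zero, add_zero] at hscan
    set tB := scanE k evs (S0 cs (lo - 1)) hi with htB
    have hpin : t = tB := pin_S0 cs hpos k t tB hg.1 hg.2 hscan.1 hscan.2
    have hr1 : 1 ≤ k - S0 cs (t - 1) := by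
      have := hg.1
      omega
    -- A's value
    have hA : solution n cs
        = pickB ((cs.zip cs).map (condB t)) 0 (k - S0 cs (t - 1)) := by
      have hgtime : getTime k cs = t := by
        unfold getTime
        rw [hmin]
      unfold solution
      rw [if_neg hle]
      simp only [PySem.List.len_eq]
      rw [← hkdef, hgtime, foldl_sub_eq]
      have hmap : (cs.map (fun core => PySem.Int.floordiv (t - 1) core)).sum
          = S0 cs (t - 1) := by
        unfold S0
        congr 1
        apply List.map_congr_left
        intro c hc
        rw [PySem.Int.floordiv_eq_ediv_of_pos (hpos c hc)]
      rw [hmap]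
      exact aScan_eq_pickB t ht1 cs 0 _ hpos
    -- B's value
    have hB : solution_alt n cs
        = pickB ((cs.zip cs).map (condB t)) 0 (k - S0 cs (t - 1)) := by
      unfold solution_alt
      rw [if_neg hle]
      simp only [PySem.List.len_eq]
      rw [← hkdef]
      rw [sumDivB_eq cs hpos, ← hdendef, ← hnumdef, ← hlodef, ← hhidef]
      rw [sumDivB_eq cs hpos, ← hevs, ← htB, ← hpin]
      rw [sumDivB_eq cs hpos]
      exact sel_eq_pickB t ht1 cs 0 _ hr1 hpos
    rw [hA, hB]

-- ===== VERDICT (by name: the statement is the Claim_ definition above) =====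
theorem solution_spec : Claim_equal_solution := by
  intro n cores _hdom hpre
  unfold Spec_solution
  exact main_eq n cores hpre
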